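-- pv_equiv track=rewrite | github.com/abpooja05/100Day-DSAChallenge-in-Python | Medium/Minimum sum/minimum-sum.py | solve
-- ===== SOURCE A (Python) =====
-- def solve(arr, n):
--
--   # sort the array
--   arr.sort()
--
--   # let two numbers be a and b
--   a = 0
--   b = 0
--   for i in range(n):
--
--       # Fill a and b with every alternate
--       # digit of input array
--       if (i % 2 != 0):
--           a = a * 10 + arr[i]
--       else:
--           b = b * 10 + arr[i]
--
--   # return the sum
--   return a + b
-- ===== SOURCE B (Python) =====
-- def solve(arr, n):
--     # same in-place sort as A; equivalence is about the return value
--     arr.sort()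
--     pre = arr[:max(n, 0)]
--     a = 0
--     for d in pre[1::2]:
--         a = a * 10 + d
--     b = 0
--     for d in pre[0::2]:
--         b = b * 10 + d
--     return a + b
-- ===== Notes on version B (the rewrite author's own statement) =====
-- stated objective: alternative
-- what changed: Replaces the single index loop with a parity branch by two separate accumulator passes over the even-index and odd-index slices of the sorted prefix.
import Mathlib
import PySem

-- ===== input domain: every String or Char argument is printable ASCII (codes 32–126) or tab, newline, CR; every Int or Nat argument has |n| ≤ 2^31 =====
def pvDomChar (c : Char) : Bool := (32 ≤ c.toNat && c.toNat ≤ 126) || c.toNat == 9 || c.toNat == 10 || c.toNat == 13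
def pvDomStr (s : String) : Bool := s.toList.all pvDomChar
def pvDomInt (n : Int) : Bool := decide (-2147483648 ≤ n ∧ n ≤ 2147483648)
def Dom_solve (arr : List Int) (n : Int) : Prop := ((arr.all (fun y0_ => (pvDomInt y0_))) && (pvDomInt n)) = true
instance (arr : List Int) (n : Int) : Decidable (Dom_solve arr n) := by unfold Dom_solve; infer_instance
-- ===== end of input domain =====

-- B builds the two numbers in two separate slice passes instead of A's parity-branched index loop;
-- an alternative decomposition, same cost. Both sort the list in place in Python; equivalence is about the return value.

-- ===== PORT A =====
def solve (arr : List Int) (n : Int) : Int :=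
  let s := PySem.List.sorted arr (fun x => x) false
  let p := (PySem.List.pyRange 0 n 1).foldl
    (fun (p : Int × Int) i =>
      if PySem.Int.mod i 2 ≠ 0 then (p.1 * 10 + PySem.List.pyGetD s i 0, p.2)
      else (p.1, p.2 * 10 + PySem.List.pyGetD s i 0)) (0, 0)
  p.1 + p.2

-- ===== PORT B =====
def solve_alt (arr : List Int) (n : Int) : Int :=
  let s := PySem.List.sorted arr (fun x => x) false
  let pre := PySem.List.slice s none (some (max n 0))
  let a := ((PySem.List.slice? pre (some 1) none 2).getD []).foldl (fun acc d => acc * 10 + d) 0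
  let b := ((PySem.List.slice? pre (some 0) none 2).getD []).foldl (fun acc d => acc * 10 + d) 0
  a + b

-- ===== PRECONDITION & SPEC =====
-- A indexes arr[i] for i in range(n): it raises IndexError exactly when n > len(arr), so Pre_ excludes that.
def Pre_solve (arr : List Int) (n : Int) : Prop := n ≤ (arr.length : Int)
instance (arr : List Int) (n : Int) : Decidable (Pre_solve arr n) := by unfold Pre_solve; infer_instance
def pvWitness_solve : List Int × Int := ([3, 1, 2], 3)

def Spec_solve (arr : List Int) (n : Int) (out : Int) : Prop := out = solve_alt arr n
instance (arr : List Int) (n : Int) (out : Int) : Decidable (Spec_solve arr n out) := by unfold Spec_solve; infer_instance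

-- ===== CLAIM (what is proved, stated in full; the proofs are below) =====
def Claim_equal_solve : Prop := ∀ (arr : List Int) (n : Int), Dom_solve arr n → Pre_solve arr n → Spec_solve arr n (solve arr n)

-- ===== LEMMAS AND PROOFS =====

-- every other element, starting with the first (what xs[0::2] selects)
def evens : List Int → List Int
  | [] => []
  | [x] => [x]
  | x :: _ :: t => x :: evens t

theorem evens_cons (x : Int) (t : List Int) : evens (x :: t) = x :: evens t.tail := by
  cases t <;> simp [evens]

-- A's interleaved loop body as a structural recursion (flag true = next digit goes to a)
def G : List Int → Bool → Int × Int → Int × Int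
  | [], _, p => p
  | x :: t, flag, (a, b) =>
    if flag then G t false (a * 10 + x, b) else G t true (a, b * 10 + x)

theorem G_char : ∀ (l : List Int) (flag : Bool) (a b : Int),
    G l flag (a, b) =
      (if flag then ((evens l).foldl (fun acc d => acc * 10 + d) a,
                     (evens l.tail).foldl (fun acc d => acc * 10 + d) b)
       else ((evens l.tail).foldl (fun acc d => acc * 10 + d) a,
             (evens l).foldl (fun acc d => acc * 10 + d) b)) := by
  intro l
  induction l with
  | nil => intro flag a b; cases flag <;> simp [G, evens]
  | cons x t ih =>
    intro flag a b
    cases flag <;> simp [G, ih, evens_cons]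

-- A's index loop over range(j, j+m) with the parity branch = G on the corresponding segment
theorem loopA (s : List Int) : ∀ (m j : Nat) (a b : Int), j + m ≤ s.length →
    (PySem.List.pyRange (j : Int) ((j : Int) + (m : Int)) 1).foldl
      (fun (p : Int × Int) i =>
        if PySem.Int.mod i 2 ≠ 0 then (p.1 * 10 + PySem.List.pyGetD s i 0, p.2)
        else (p.1, p.2 * 10 + PySem.List.pyGetD s i 0)) (a, b)
    = G ((s.drop j).take m) (decide (j % 2 = 1)) (a, b) := by
  intro m
  induction m with
  | zero =>
    intro j a b _
    rw [show ((j:Int) + (0:Nat) : Int) = (j:Int) by push_cast; ring]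
    rw [PySem.List.pyRange_one_eq_nil le_rfl]
    simp [G]
  | succ m ih =>
    intro j a b h
    have hj : j < s.length := by omega
    rw [PySem.List.pyRange_one_cons (by push_cast; omega)]
    rw [List.foldl_cons]
    have hmod : PySem.Int.mod (j:Int) 2 = ((j % 2 : Nat) : Int) := PySem.Int.mod_natCast j 2
    have hget : PySem.List.pyGetD s (j:Int) 0 = s[j] := PySem.List.pyGetD_ofNat s j 0 hj
    have hdrop : s.drop j = s[j] :: s.drop (j+1) := List.drop_eq_getElem_cons hj
    rw [hdrop]
    have htake : (s[j] :: s.drop (j+1)).take (m+1) = s[j] :: (s.drop (j+1)).take m := rfl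
    rw [htake]
    have hrange : ((j:Int) + 1) = ((j+1 : Nat) : Int) := by push_cast; ring
    have hrange2 : ((j:Int) + ((m+1 : Nat) : Int)) = (((j+1) : Nat) : Int) + ((m : Nat) : Int) := by push_cast; ring
    by_cases hp : j % 2 = 1
    · have : (if PySem.Int.mod (j:Int) 2 ≠ 0 then (a * 10 + PySem.List.pyGetD s (j:Int) 0, b)
          else (a, b * 10 + PySem.List.pyGetD s (j:Int) 0)) = (a * 10 + s[j], b) := by
        rw [hmod, hget, hp]; norm_num
      rw [this, hrange2, hrange, ih (j+1) _ _ (by omega)]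
      have hg : G (s[j] :: (s.drop (j+1)).take m) (decide (j % 2 = 1)) (a, b)
          = G ((s.drop (j+1)).take m) false (a * 10 + s[j], b) := by
        simp [G, hp]
      rw [hg]
      congr 1
      simp [Nat.add_mod, hp]
    · have hp0 : j % 2 = 0 := by omega
      have : (if PySem.Int.mod (j:Int) 2 ≠ 0 then (a * 10 + PySem.List.pyGetD s (j:Int) 0, b)
          else (a, b * 10 + PySem.List.pyGetD s (j:Int) 0)) = (a, b * 10 + s[j]) := by
        rw [hmod, hget, hp0]; norm_num
      rw [this, hrange2, hrange, ih (j+1) _ _ (by omega)]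
      have hg : G (s[j] :: (s.drop (j+1)).take m) (decide (j % 2 = 1)) (a, b)
          = G ((s.drop (j+1)).take m) true (a, b * 10 + s[j]) := by
        simp [G, hp]
      rw [hg]
      congr 1
      simp [Nat.add_mod, hp0]

-- the filterMap form slice? takes for xs[0::2], characterised structurally
theorem core0 : ∀ xs : List Int,
    List.filterMap (fun k : Nat => xs[((2:Int) * (k:Int)).toNat]?) (List.range ((xs.length+1)/2)) = evens xs := by
  intro xs
  induction xs using evens.induct with
  | case1 => simp [evens]
  | case2 x => simp [evens, List.range_succ]
  | case3 x y t ih =>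
    have hc : ((x :: y :: t).length + 1) / 2 = (t.length + 1) / 2 + 1 := by
      simp; omega
    rw [hc, List.range_succ_eq_map, List.filterMap_cons]
    have h0 : ((x :: y :: t)[((2:Int) * ((0:Nat):Int)).toNat]?) = some x := by norm_num
    have hstep : ∀ k : Nat, ((x :: y :: t)[((2:Int) * ((Nat.succ k : Nat):Int)).toNat]?) = t[((2:Int) * (k:Int)).toNat]? := by
      intro k
      have e1 : ((2:Int) * ((Nat.succ k : Nat):Int)).toNat = 2 * k + 2 := by
        push_cast; omega
      have e2 : ((2:Int) * (k:Int)).toNat = 2 * k := by omega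
      rw [e1, e2]
      simp
    simp only [List.filterMap_map, Function.comp]
    rw [h0]
    simp only [hstep]
    rw [evens, ← ih]

-- the filterMap form slice? takes for xs[1::2]
theorem core1 : ∀ xs : List Int,
    List.filterMap (fun k : Nat => xs[((1:Int) + 2 * (k:Int)).toNat]?) (List.range (xs.length/2)) = evens xs.tail := by
  intro xs
  induction xs using evens.induct with
  | case1 => simp [evens]
  | case2 x => simp [evens]
  | case3 x y t ih =>
    have hc : (x :: y :: t).length / 2 = t.length / 2 + 1 := by
      simp; omega
    rw [hc, List.range_succ_eq_map, List.filterMap_cons]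
    have h0 : ((x :: y :: t)[((1:Int) + 2 * ((0:Nat):Int)).toNat]?) = some y := by norm_num
    have hstep : ∀ k : Nat, ((x :: y :: t)[((1:Int) + 2 * ((Nat.succ k : Nat):Int)).toNat]?) = t[((1:Int) + 2 * (k:Int)).toNat]? := by
      intro k
      have e1 : ((1:Int) + 2 * ((Nat.succ k : Nat):Int)).toNat = 2 * k + 3 := by
        push_cast; omega
      have e2 : ((1:Int) + 2 * (k:Int)).toNat = 2 * k + 1 := by omega
      rw [e1]
      simp only [List.getElem?_cons_succ]
      congr 1
      omega
    simp only [List.filterMap_map, Function.comp]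
    rw [h0]
    simp only [hstep]
    rw [ih]
    cases t <;> simp [evens]

-- xs[0::2] = evens xs
theorem slice2_zero (xs : List Int) :
    PySem.List.slice? xs (some 0) none 2 = some (evens xs) := by
  simp only [PySem.List.slice?, PySem.List.sliceIndices]
  norm_num
  rw [show (if 0 < xs.length then (((xs.length:Int) + 2 - 1) / 2).toNat else 0) = (xs.length + 1)/2 by
    split <;> omega]
  exact core0 xs

-- xs[1::2] = evens xs.tail
theorem slice2_one (xs : List Int) :
    PySem.List.slice? xs (some 1) none 2 = some (evens xs.tail) := by
  cases xs with
  | nil => decide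
  | cons x t =>
    simp only [PySem.List.slice?, PySem.List.sliceIndices]
    norm_num
    rw [show (if 0 < t.length then (((t.length:Int) + 2 - 1) / 2).toNat else 0) = (x :: t).length / 2 by
      simp; split <;> omega]
    have h := core1 (x :: t)
    simpa using h

-- ===== VERDICT (by name: the statement is the Claim_ definition above) =====
theorem solve_spec : Claim_equal_solve := by
  intro arr n _ hpre
  have hp : n ≤ (arr.length : Int) := hpre
  unfold Spec_solve solve solve_alt
  dsimp only
  set s := PySem.List.sorted arr (fun x => x) false with hs
  have hlen : s.length = arr.length := PySem.List.length_sorted arr (fun x => x) false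
  by_cases hn : n ≤ 0
  · have hmax : max n 0 = 0 := by omega
    rw [PySem.List.pyRange_one_eq_nil hn, hmax]
    rw [PySem.List.slice_to s (le_refl (0:Int))]
    simp [slice2_zero, slice2_one, evens]
  · have hA := loopA s n.toNat 0 0 0 (by omega)
    rw [show ((0:Nat):Int) + ((n.toNat : Nat) : Int) = n by omega] at hA
    rw [show (((0:Nat)) : Int) = (0:Int) from rfl] at hA
    rw [hA, G_char]
    have hmax : max n 0 = n := by omega
    rw [hmax, PySem.List.slice_to s (show (0:Int) ≤ n by omega)]
    rw [slice2_zero, slice2_one]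
    simp
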